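-- pv_equiv track=rewrite | github.com/KingAscent/CodingBat | Python/Warmup-2/string_match.py | string_match
-- ===== SOURCE A (Python) =====
-- def string_match(a, b):
--   # Limit the code to the size of the smaller string
--   smaller = len(a)
--   if len(b) < smaller:
--     smaller = len(b)
--
--   count = 0
--
--   # Check when the same letters appear in the strings
--   for i in range(smaller - 1):
--     if a[i] == b[i] and a[i + 1] == b[i + 1]:
--       count += 1
--
--   return count
-- ===== SOURCE B (Python) =====
-- def string_match(a, b):
--     # Run-length strategy: a maximal run of r consecutive matching positions
--     # contributes exactly max(r - 1, 0) matching length-2 substrings, so track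
--     # runs of matches over the overlap (zip truncates) and sum their payoffs.
--     total = 0
--     run = 0
--     for x, y in zip(a, b):
--         if x == y:
--             run += 1
--         else:
--             total += max(run - 1, 0)
--             run = 0
--     return total + max(run - 1, 0)
-- ===== Notes on version B (the rewrite author's own statement) =====
-- stated objective: alternative
-- what changed: B replaces A's per-index test of each adjacent position pair by a run-length scan: it tracks maximal runs of consecutive matching positions and adds max(run-1,0) per run, correct because a run of r matches contains exactly r-1 matching length-2 substrings.
import Mathlib
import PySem

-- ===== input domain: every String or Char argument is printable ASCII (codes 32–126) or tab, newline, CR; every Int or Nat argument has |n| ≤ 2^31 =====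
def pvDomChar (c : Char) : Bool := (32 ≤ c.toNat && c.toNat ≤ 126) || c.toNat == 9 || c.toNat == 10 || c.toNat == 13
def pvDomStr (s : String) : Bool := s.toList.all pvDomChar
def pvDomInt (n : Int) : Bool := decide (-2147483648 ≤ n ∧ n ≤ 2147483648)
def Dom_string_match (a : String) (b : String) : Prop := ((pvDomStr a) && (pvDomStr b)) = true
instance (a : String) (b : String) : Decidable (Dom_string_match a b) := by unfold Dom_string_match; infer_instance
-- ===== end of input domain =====

-- B replaces A's per-index adjacent-pair test by a run-length scan over the overlap:
-- it tracks maximal runs of consecutive matching positions and adds max(run-1,0) per run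
-- (alternative algorithm, same linear cost).


-- ===== PORT A =====
def string_match (a : String) (b : String) : Int :=
  let smaller0 := PySem.Str.len a
  let smaller := if PySem.Str.len b < smaller0 then PySem.Str.len b else smaller0
  (PySem.List.pyRange 0 (smaller - 1) 1).foldl
    (fun count i =>
      if PySem.Str.pyGet? a i == PySem.Str.pyGet? b i
         && PySem.Str.pyGet? a (i + 1) == PySem.Str.pyGet? b (i + 1)
      then count + 1 else count) 0

-- ===== PORT B =====
def string_match_alt (a : String) (b : String) : Int :=
  let st := (a.toList.zip b.toList).foldl
    (fun (s : Int × Int) (xy : Char × Char) =>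
      if xy.1 == xy.2 then (s.1, s.2 + 1)
      else (s.1 + max (s.2 - 1) 0, (0 : Int))) ((0 : Int), (0 : Int))
  st.1 + max (st.2 - 1) 0

-- ===== PRECONDITION & SPEC =====
def Spec_string_match (a : String) (b : String) (out : Int) : Prop := out = string_match_alt a b
instance (a : String) (b : String) (out : Int) : Decidable (Spec_string_match a b out) := by unfold Spec_string_match; infer_instance

-- ===== CLAIM (what is proved, stated in full; the proofs are below) =====
def Claim_equal_string_match : Prop := ∀ (a : String) (b : String), Dom_string_match a b → Spec_string_match a b (string_match a b)

-- ===== LEMMAS AND PROOFS =====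

-- number of adjacent true-true pairs in a boolean list (proof-side characterisation)
def adjN : List Bool → Nat
  | [] => 0
  | [_] => 0
  | x :: y :: t => (if x && y then 1 else 0) + adjN (y :: t)

lemma adjN_false_cons (l : List Bool) : adjN (false :: l) = adjN l := by
  cases l <;> simp [adjN]

-- a run of r matches alone contributes r - 1
lemma adjN_rep (r : Nat) : adjN (List.replicate r true) = r - 1 := by
  induction r with
  | zero => simp [adjN]
  | succ k ih =>
    cases k with
    | zero => simp [adjN]
    | succ k' =>
      have h : List.replicate (k' + 1 + 1) true = true :: true :: List.replicate k' true := by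
        simp [List.replicate_succ]
      rw [h]
      simp only [adjN, ← List.replicate_succ]
      rw [ih]
      simp
      omega

-- a maximal run of r matches followed by a mismatch contributes r - 1
lemma adjN_replicate (r : Nat) (l : List Bool) :
    adjN (List.replicate r true ++ false :: l) = (r - 1) + adjN l := by
  induction r with
  | zero => simp [adjN_false_cons]
  | succ r ih =>
    cases r with
    | zero => simp [adjN, adjN_false_cons]
    | succ r' =>
      have h : List.replicate (r' + 1 + 1) true ++ false :: l
          = true :: true :: (List.replicate r' true ++ false :: l) := by
        simp [List.replicate_succ]
      rw [h]
      have h2 : (true : Bool) :: (List.replicate r' true ++ false :: l)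
          = List.replicate (r' + 1) true ++ false :: l := by
        simp [List.replicate_succ]
      simp only [adjN, h2]
      rw [ih]
      simp
      omega

-- B's run-length fold over the zipped pairs computes adjN of the run context plus the table
lemma runfold (l : List (Char × Char)) (t : Int) (r : Nat) :
    (l.foldl (fun (s : Int × Int) (xy : Char × Char) =>
        if xy.1 == xy.2 then (s.1, s.2 + 1)
        else (s.1 + max (s.2 - 1) 0, (0 : Int))) (t, (r : Int))).1
      + max ((l.foldl (fun (s : Int × Int) (xy : Char × Char) =>
        if xy.1 == xy.2 then (s.1, s.2 + 1)
        else (s.1 + max (s.2 - 1) 0, (0 : Int))) (t, (r : Int))).2 - 1) 0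
    = t + (adjN (List.replicate r true ++ l.map (fun p => p.1 == p.2)) : Int) := by
  induction l generalizing t r with
  | nil =>
    simp only [List.foldl_nil, List.map_nil, List.append_nil, adjN_rep]
    omega
  | cons xy l ih =>
    by_cases h : (xy.1 == xy.2) = true
    · have hrep : List.replicate r true ++ true :: l.map (fun p : Char × Char => p.1 == p.2)
          = List.replicate (r + 1) true ++ l.map (fun p : Char × Char => p.1 == p.2) := by
        simp [List.replicate_succ']
      have e : (r : Int) + 1 = ((r + 1 : Nat) : Int) := by push_cast; ring
      simp only [List.foldl_cons, List.map_cons, h, if_pos h, hrep, e]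
      exact ih t (r + 1)
    · have hb : (xy.1 == xy.2) = false := by
        cases hxy : (xy.1 == xy.2) <;> simp_all
      have hcast : max ((r : Int) - 1) 0 = ((r - 1 : Nat) : Int) := by omega
      simp only [List.foldl_cons, List.map_cons, hb, Bool.false_eq_true, if_false]
      have hih := ih (t + max ((r : Int) - 1) 0) 0
      simp only [Nat.cast_zero, List.replicate_zero, List.nil_append] at hih
      rw [hih, adjN_replicate]
      push_cast
      omega

-- the match table as a map over the zipped pair list equals zipWith
lemma zip_map_eq_zipWith (l1 l2 : List Char) :
    (l1.zip l2).map (fun p => p.1 == p.2) = List.zipWith (fun x y => x == y) l1 l2 := by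
  induction l1 generalizing l2 with
  | nil => simp
  | cons x t ih => cases l2 <;> simp [ih]

-- adjN equals the countP over zip(m, m[1:])
lemma adjN_eq_countP (m : List Bool) :
    adjN m = (m.zip (m.drop 1)).countP (fun pq => pq.1 && pq.2) := by
  induction m with
  | nil => simp [adjN]
  | cons x t ih =>
    cases t with
    | nil => simp [adjN]
    | cons y t' =>
      simp only [List.drop_one, List.tail_cons, List.zip_cons_cons, List.countP_cons] at *
      simp only [adjN, ih]
      by_cases h : (x && y) = true <;> simp [h] <;> omega

-- B's port equals the adjacent-pair count over the match table
lemma alt_eq_countP (a b : String) :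
    string_match_alt a b
    = (((List.zipWith (fun x y => x == y) a.toList b.toList).zip
        ((List.zipWith (fun x y => x == y) a.toList b.toList).drop 1)).countP
          (fun pq => pq.1 && pq.2) : Int) := by
  simp only [string_match_alt]
  have h := runfold (a.toList.zip b.toList) 0 0
  simp only [List.replicate_zero, List.nil_append, Nat.cast_zero, zero_add] at h
  rw [h, zip_map_eq_zipWith, adjN_eq_countP]

-- counting matched adjacent indices in the table m equals the zip(m, m[1:]) count
lemma adj_countP (m : List Bool) :
    (List.range (m.length - 1)).countP (fun k => m.getD k false && m.getD (k + 1) false)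
      = (m.zip (m.drop 1)).countP (fun pq => pq.1 && pq.2) := by
  induction m with
  | nil => simp
  | cons x t ih =>
    cases t with
    | nil => simp
    | cons y t' =>
      simp only [List.length_cons, Nat.add_sub_cancel, List.range_succ_eq_map,
        List.countP_cons, List.countP_map, List.drop_one, List.zip_cons_cons,
        List.tail_cons, Function.comp_def, Nat.succ_eq_add_one,
        List.getD_cons_succ, List.getD_cons_zero] at *
      omega

-- A's per-index test at an in-range index equals the table lookup
lemma cond_eq (l1 l2 : List Char) (k : Nat) (hk : k + 1 < min l1.length l2.length) :
    ((PySem.List.pyGet? l1 (0 + (k:Int)) == PySem.List.pyGet? l2 (0 + (k:Int))) &&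
     (PySem.List.pyGet? l1 (0 + (k:Int) + 1) == PySem.List.pyGet? l2 (0 + (k:Int) + 1)))
    = ((List.zipWith (fun x y => x == y) l1 l2).getD k false &&
       (List.zipWith (fun x y => x == y) l1 l2).getD (k+1) false) := by
  have h1 : k < l1.length := by omega
  have h2 : k < l2.length := by omega
  have h3 : k + 1 < l1.length := by omega
  have h4 : k + 1 < l2.length := by omega
  have e : ((k:Int) + 1) = ((k+1 : Nat) : Int) := by push_cast; ring
  simp only [zero_add]
  rw [e, PySem.List.pyGet?_natCast, PySem.List.pyGet?_natCast,
    PySem.List.pyGet?_natCast, PySem.List.pyGet?_natCast]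
  simp [h1, h2, h3, h4, List.getElem_zipWith]

-- A's indexed fold equals the adjacent-pair count over the match table
lemma string_match_core (l1 l2 : List Char) :
    (PySem.List.pyRange 0 ((if (l2.length : Int) < (l1.length : Int) then (l2.length : Int) else (l1.length : Int)) - 1) 1).foldl
      (fun count i =>
        if PySem.List.pyGet? l1 i == PySem.List.pyGet? l2 i
           && PySem.List.pyGet? l1 (i + 1) == PySem.List.pyGet? l2 (i + 1)
        then count + 1 else count) 0
    = (((List.zipWith (fun x y => x == y) l1 l2).zip
        ((List.zipWith (fun x y => x == y) l1 l2).drop 1)).countP (fun pq => pq.1 && pq.2) : Int) := by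
  set n := min l1.length l2.length with hn
  have hs : (if (l2.length : Int) < (l1.length : Int) then (l2.length : Int) else (l1.length : Int)) = (n : Int) := by
    split_ifs with h <;> simp [hn] <;> omega
  rw [hs, PySem.List.foldl_if_add_one
    (fun i => PySem.List.pyGet? l1 i == PySem.List.pyGet? l2 i
      && (PySem.List.pyGet? l1 (i + 1) == PySem.List.pyGet? l2 (i + 1))),
    PySem.List.pyRange_one]
  have ht : ((n : Int) - 1 - 0).toNat = n - 1 := by omega
  rw [ht, List.countP_map]
  have hc : List.countP
      ((fun i => PySem.List.pyGet? l1 i == PySem.List.pyGet? l2 i &&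
          (PySem.List.pyGet? l1 (i + 1) == PySem.List.pyGet? l2 (i + 1))) ∘ fun k : Nat => 0 + (k : Int))
      (List.range (n - 1))
    = List.countP
      (fun k => (List.zipWith (fun x y : Char => x == y) l1 l2).getD k false &&
        (List.zipWith (fun x y : Char => x == y) l1 l2).getD (k + 1) false)
      (List.range (n - 1)) := by
    apply List.countP_congr
    intro k hk
    have hk2 := List.mem_range.mp hk
    simp only [Function.comp_apply]
    rw [cond_eq l1 l2 k (by omega)]
  rw [hc]
  have hlen : (List.zipWith (fun x y : Char => x == y) l1 l2).length = n := by
    simp [List.length_zipWith, hn]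
  have h2 := adj_countP (List.zipWith (fun x y : Char => x == y) l1 l2)
  rw [hlen] at h2
  rw [h2]
  simp

lemma string_match_eq (a b : String) : string_match a b = string_match_alt a b := by
  rw [alt_eq_countP]
  unfold string_match
  simp only [PySem.Str.len_eq, PySem.Str.pyGet?, PySem.Chars.pyGet?]
  exact string_match_core a.toList b.toList

-- ===== VERDICT (by name: the statement is the Claim_ definition above) =====
theorem string_match_spec : Claim_equal_string_match := by
  intro a b _
  exact string_match_eq a b
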